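-- pv_equiv track=rewrite | github.com/manishjnv/ti-platform | api/app/normalizers/correlation.py | corroboration_boost
-- ===== SOURCE A (Python) =====
-- _CORROBORATION_BOOSTS: list[int] = [15, 10, 5, 3, 2]
--
-- MAX_CORROBORATION_BOOST = 35  # sum of above
--
-- def corroboration_boost(source_count: int) -> int:
--     """Return a confidence boost (0-35) based on how many sources report the same entity.
--
--     Args:
--         source_count: Total number of distinct sources/feeds reporting this entity.
--
--     Returns:
--         Integer bonus to add to base confidence (0-35).
--     """
--     if source_count <= 1:
--         return 0
--
--     extra = source_count - 1  # First source is baseline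
--     boost = 0
--     for i in range(min(extra, len(_CORROBORATION_BOOSTS))):
--         boost += _CORROBORATION_BOOSTS[i]
--
--     return min(boost, MAX_CORROBORATION_BOOST)
-- ===== SOURCE B (Python) =====
-- _CUM = [0, 15, 25, 30, 33, 35]  # prefix sums of the boost schedule
--
-- def corroboration_boost(source_count: int) -> int:
--     idx = min(max(source_count - 1, 0), len(_CUM) - 1)
--     return _CUM[idx]
-- ===== Notes on version B (the rewrite author's own statement) =====
-- stated objective: simpler
-- what changed: Replaces the accumulation loop over the boost list with a single clamped index lookup into a precomputed prefix-sum table.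
import Mathlib
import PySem

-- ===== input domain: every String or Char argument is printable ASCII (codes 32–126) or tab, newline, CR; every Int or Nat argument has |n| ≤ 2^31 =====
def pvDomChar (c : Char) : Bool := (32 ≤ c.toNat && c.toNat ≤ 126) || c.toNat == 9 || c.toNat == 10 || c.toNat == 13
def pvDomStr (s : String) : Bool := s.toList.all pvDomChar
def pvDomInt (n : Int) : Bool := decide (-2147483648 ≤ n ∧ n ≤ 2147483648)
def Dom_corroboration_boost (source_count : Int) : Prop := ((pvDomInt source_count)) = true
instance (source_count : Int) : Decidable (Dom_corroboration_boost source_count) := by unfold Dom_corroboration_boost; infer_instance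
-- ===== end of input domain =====

-- B replaces A's accumulation loop with one clamped lookup in a precomputed prefix-sum table (simpler).


-- ===== PORT A =====
def corrBoosts : List Int := [15, 10, 5, 3, 2]

def corroboration_boost (source_count : Int) : Int :=
  if source_count ≤ 1 then 0
  else
    let extra := source_count - 1
    let boost := (PySem.List.pyRange 0 (min extra (corrBoosts.length : Int)) 1).foldl
      (fun b i => b + PySem.List.pyGetD corrBoosts i 0) 0
    min boost 35

-- ===== PORT B =====
def cumBoosts : List Int := [0, 15, 25, 30, 33, 35]

def corroboration_boost_alt (source_count : Int) : Int :=
  let idx := min (max (source_count - 1) 0) ((cumBoosts.length : Int) - 1)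
  PySem.List.pyGetD cumBoosts idx 0

-- ===== PRECONDITION & SPEC =====
def Spec_corroboration_boost (source_count : Int) (out : Int) : Prop := out = corroboration_boost_alt source_count
instance (source_count : Int) (out : Int) : Decidable (Spec_corroboration_boost source_count out) := by unfold Spec_corroboration_boost; infer_instance

-- ===== CLAIM (what is proved, stated in full; the proofs are below) =====
def Claim_equal_corroboration_boost : Prop := ∀ (source_count : Int), Dom_corroboration_boost source_count → Spec_corroboration_boost source_count (corroboration_boost source_count)

-- ===== LEMMAS AND PROOFS =====

-- ===== VERDICT (by name: the statement is the Claim_ definition above) =====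
theorem corroboration_boost_spec : Claim_equal_corroboration_boost := by
  unfold Claim_equal_corroboration_boost Spec_corroboration_boost
  intro n _
  unfold corroboration_boost corroboration_boost_alt
  norm_num [corrBoosts, cumBoosts, List.length_cons, List.length_nil]
  by_cases h1 : n ≤ 1
  · rw [if_pos h1]
    have h : min (max (n - 1) 0) (5 : Int) = 0 := by omega
    rw [h]
    decide
  · rw [if_neg h1]
    by_cases h6 : n ≥ 6
    · have hmin : min (n - 1) (5 : Int) = 5 := by omega
      have hidx : min (max (n - 1) 0) (5 : Int) = 5 := by omega
      rw [hmin, hidx]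
      decide
    · have : n = 2 ∨ n = 3 ∨ n = 4 ∨ n = 5 := by omega
      rcases this with h | h | h | h <;> subst h <;> decide
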